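-- pv_equiv track=rewrite | github.com/coding-samu/Algo2 | graphsMethods.py | bfs_same_distance
-- ===== SOURCE A (Python) =====
-- def bfs_distance(x, G):
--     """
--     Calculates the shortest distance from a given node 'x' to all other nodes in the graph 'G' using Breadth-First Search (BFS).
--
--     Parameters:
--     - x: The starting node.
--     - G: The graph represented as an adjacency list.
--
--     Returns:
--     - D: A list of distances from the starting node to all other nodes. The distance is -1 if a node is unreachable from the starting node.
--     """
--     D = [-1]*len(G)
--     D[x] = 0
--     coda = [x]
--     i = 0
--     while len(coda) > i:
--         u = coda[i]
--         i += 1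
--         for y in G[u]:
--             if D[y] == -1:
--                 D[y] = D[u]+1
--                 coda.append(y)
--     return D
--
-- def bfs_same_distance(u, v, G):
--     """
--     Returns a list of nodes in the graph `G` that have the same distance from nodes `u` and `v`.
--
--     Parameters:
--     - u: The starting node.
--     - v: The target node.
--     - G: The graph represented as an adjacency matrix.
--
--     Returns:
--     - S: A list of nodes that have the same distance from nodes `u` and `v`.
--     """
--     Du = bfs_distance(u, G)
--     Dv = bfs_distance(v, G)
--
--     S = []
--
--     for i in range(len(G)):
--         if Du[i] == Dv[i]:
--             S.append(i)
--
--     return S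
-- ===== SOURCE B (Python) =====
-- def bfs_same_distance(u, v, G):
--     """Queueless round-based label propagation (Bellman-Ford-style by levels):
--     no queue/frontier list at all; round k scans the whole vertex array and
--     expands every node currently labelled k."""
--     n = len(G)
--
--     def dist(x):
--         D = [-1] * n
--         D[x] = 0
--         for k in range(n):
--             for a in range(n):
--                 if D[a] == k:
--                     for y in G[a]:
--                         if D[y] == -1:
--                             D[y] = k + 1
--         return D
--
--     Du = dist(u)
--     Dv = dist(v)
--     return [i for i in range(n) if Du[i] == Dv[i]]
-- ===== Notes on version B (the rewrite author's own statement) =====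
-- stated objective: alternative
-- what changed: A's queue-based BFS (a shared coda list scanned by a moving cursor, distances read back from D[u]) is replaced by a queueless Bellman-Ford-style label propagation: there is no queue or frontier structure at all; round k scans the entire vertex array and relaxes the out-edges of every node currently labelled k, and the output is a range comprehension instead of an append loop.
-- outside the precondition, e.g. on bfs_same_distance(0, 0, [[], [99]]): A returns [0, 1], B returns [0, 1]
import Mathlib
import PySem

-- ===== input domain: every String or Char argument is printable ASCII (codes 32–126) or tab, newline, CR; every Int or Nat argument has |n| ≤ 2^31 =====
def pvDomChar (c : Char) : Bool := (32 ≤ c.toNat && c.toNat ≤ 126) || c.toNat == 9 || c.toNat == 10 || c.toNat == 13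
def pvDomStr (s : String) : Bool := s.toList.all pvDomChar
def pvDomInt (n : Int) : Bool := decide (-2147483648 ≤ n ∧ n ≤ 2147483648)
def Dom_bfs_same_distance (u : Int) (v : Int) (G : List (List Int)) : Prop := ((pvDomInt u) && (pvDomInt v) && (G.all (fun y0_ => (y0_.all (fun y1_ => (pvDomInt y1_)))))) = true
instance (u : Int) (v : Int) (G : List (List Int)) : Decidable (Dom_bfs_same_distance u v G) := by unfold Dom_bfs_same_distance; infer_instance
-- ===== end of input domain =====

-- B replaces A's queue-based BFS by a queueless round-based label propagation
-- (round k scans the whole vertex array and expands every node labelled k); objective: alternative.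

-- Shared indexing primitives (Python list read/write; exact under Pre_, which puts all indices in [-len, len)).
def pvGet (xs : List Int) (i : Int) : Int := PySem.List.pyGetD xs i 0
def pvSet (xs : List Int) (i : Int) (v : Int) : List Int := PySem.List.pySetD xs i v

-- ===== PORT A =====
-- inner 'for y in G[u]' loop of bfs_distance; state = (D, pending queue); appends go to the queue's tail
def bfsA_scan (G : List (List Int)) (s : List Int × List Int) (u : Int) : List Int × List Int :=
  (PySem.List.pyGetD G u []).foldl
    (fun s y => if pvGet s.1 y = -1 then (pvSet s.1 y (pvGet s.1 u + 1), s.2 ++ [y]) else s) s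

-- 'while len(coda) > i' loop; q is the unprocessed suffix coda[i:] (the processed prefix is never re-read).
-- Fuel |G|+1 is a totality guard only: the loop body runs at most once per node ever enqueued (≤ |G| under Pre_).
def bfsA_loop (G : List (List Int)) : Nat → List Int → List Int → List Int
  | 0, D, _ => D
  | f+1, D, q =>
    match q with
    | [] => D
    | u :: q' => bfsA_loop G f (bfsA_scan G (D, q') u).1 (bfsA_scan G (D, q') u).2

def bfs_distanceA (x : Int) (G : List (List Int)) : List Int :=
  bfsA_loop G (G.length + 1) (pvSet (List.replicate G.length (-1)) x 0) [x]

def bfs_same_distance (u : Int) (v : Int) (G : List (List Int)) : List Int :=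
  let Du := bfs_distanceA u G
  let Dv := bfs_distanceA v G
  (PySem.List.pyRange 0 (G.length : Int) 1).foldl
    (fun S i => if pvGet Du i = pvGet Dv i then S ++ [i] else S) []

-- ===== PORT B =====
-- 'if D[y] == -1: D[y] = k + 1' (one edge relaxation)
def relax (k : Int) (D : List Int) (y : Int) : List Int :=
  if pvGet D y = -1 then pvSet D y (k + 1) else D

-- body of the 'for a in range(n)' scan: expand node a's out-edges iff it is currently labelled k
def stepC (G : List (List Int)) (k : Int) (D : List Int) (a : Int) : List Int :=
  if pvGet D a = k then (PySem.List.pyGetD G a []).foldl (relax k) D else D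

-- one propagation round: 'for a in range(n): …'
def bfsC_round (G : List (List Int)) (D : List Int) (k : Int) : List Int :=
  (PySem.List.pyRange 0 (G.length : Int) 1).foldl (stepC G k) D

-- 'for k in range(n)' rounds over the initial array D[x]=0, rest -1
def bfs_distanceC (x : Int) (G : List (List Int)) : List Int :=
  (PySem.List.pyRange 0 (G.length : Int) 1).foldl (bfsC_round G)
    (pvSet (List.replicate G.length (-1)) x 0)

def bfs_same_distance_alt (u : Int) (v : Int) (G : List (List Int)) : List Int :=
  let Du := bfs_distanceC u G
  let Dv := bfs_distanceC v G
  (PySem.List.pyRange 0 (G.length : Int) 1).filter (fun i => decide (pvGet Du i = pvGet Dv i))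

-- ===== PRECONDITION & SPEC =====
-- Pre_ restricts u, v and every adjacency entry to Python's index range [-len G, len G) (negative values
-- select nodes from the end, exactly as Python's list indexing does): an index outside that range makes
-- Python raise IndexError when it is reached, and requiring it of every row is the closed form of that domain
-- (it also excludes some returning inputs whose out-of-range entries sit only in rows BFS never reaches).
def Pre_bfs_same_distance (u : Int) (v : Int) (G : List (List Int)) : Prop :=
  -(G.length : Int) ≤ u ∧ u < (G.length : Int) ∧ -(G.length : Int) ≤ v ∧ v < (G.length : Int) ∧
  ∀ row ∈ G, ∀ y ∈ row, -(G.length : Int) ≤ y ∧ y < (G.length : Int)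
instance (u : Int) (v : Int) (G : List (List Int)) : Decidable (Pre_bfs_same_distance u v G) := by
  unfold Pre_bfs_same_distance; infer_instance

def pvWitness_bfs_same_distance : Int × Int × List (List Int) := (0, 2, [[1], [2], [], [0]])

def Spec_bfs_same_distance (u : Int) (v : Int) (G : List (List Int)) (out : List Int) : Prop := out = bfs_same_distance_alt u v G
instance (u : Int) (v : Int) (G : List (List Int)) (out : List Int) : Decidable (Spec_bfs_same_distance u v G out) := by unfold Spec_bfs_same_distance; infer_instance

-- ===== CLAIM (what is proved, stated in full; the proofs are below) =====
def Claim_equal_bfs_same_distance : Prop := ∀ (u : Int) (v : Int) (G : List (List Int)), Dom_bfs_same_distance u v G → Pre_bfs_same_distance u v G → Spec_bfs_same_distance u v G (bfs_same_distance u v G)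

-- ===== LEMMAS AND PROOFS =====

-- proof-only abbreviations
def cneg (D : List Int) : Nat := D.count (-1)
-- a legal Python index for a list of length `len G` (negative = from the end)
def NOK (G : List (List Int)) (i : Int) : Prop := -(G.length : Int) ≤ i ∧ i < (G.length : Int)
def GOK (G : List (List Int)) : Prop := ∀ row ∈ G, ∀ y ∈ row, NOK G y
def DOK (G : List (List Int)) (D : List Int) : Prop := D.length = G.length ∧ ∀ a ∈ D, -1 ≤ a
-- the cell a Python index denotes
def pvIdx (len : Nat) (i : Int) : Nat := if 0 ≤ i then i.toNat else len - (-i).toNat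
-- A's and the level-BFS proof model's inner step functions, named for the proofs
def stepA (u : Int) (s : List Int × List Int) (y : Int) : List Int × List Int :=
  if pvGet s.1 y = -1 then (pvSet s.1 y (pvGet s.1 u + 1), s.2 ++ [y]) else s
def stepB (depth : Int) (s : List Int × List Int) (y : Int) : List Int × List Int :=
  if pvGet s.1 y = -1 then (pvSet s.1 y (depth + 1), s.2 ++ [y]) else s

-- PROOF MODEL: a level-synchronous BFS, the common refinement of A's queue and C's rounds
def bfsB_scan (G : List (List Int)) (depth : Int) (s : List Int × List Int) (u : Int) : List Int × List Int :=
  (PySem.List.pyGetD G u []).foldl (stepB depth) s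

def bfsB_level (G : List (List Int)) (depth : Int) (D : List Int) (F : List Int) : List Int × List Int :=
  F.foldl (bfsB_scan G depth) (D, [])

def bfsB_loop (G : List (List Int)) : Nat → List Int → Int → List Int → List Int
  | 0, D, _, _ => D
  | f+1, D, depth, F =>
    match F with
    | [] => D
    | _ :: _ => bfsB_loop G f (bfsB_level G depth D F).1 (depth + 1) (bfsB_level G depth D F).2

def bfs_distanceB (x : Int) (G : List (List Int)) : List Int :=
  bfsB_loop G (G.length + 1) (pvSet (List.replicate G.length (-1)) x 0) 0 [x]

theorem bfsA_scan_eq (G : List (List Int)) (s : List Int × List Int) (u : Int) :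
    bfsA_scan G s u = (PySem.List.pyGetD G u []).foldl (stepA u) s := rfl

theorem pvIdx_lt (len : Nat) (i : Int) (h0 : -(len : Int) ≤ i) (h1 : i < (len : Int)) :
    pvIdx len i < len := by
  unfold pvIdx; split <;> omega

theorem pyIdx?_eq (len : Nat) (i : Int) (h0 : -(len : Int) ≤ i) (h1 : i < (len : Int)) :
    PySem.List.pyIdx? len i = some (pvIdx len i) := by
  unfold PySem.List.pyIdx? pvIdx
  split_ifs <;> first | rfl | omega

theorem pvGet_eq (D : List Int) (i : Int) (h0 : -(D.length : Int) ≤ i) (h1 : i < (D.length : Int)) :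
    pvGet D i = D[pvIdx D.length i]'(pvIdx_lt D.length i h0 h1) := by
  unfold pvGet PySem.List.pyGetD PySem.List.pyGet?
  rw [pyIdx?_eq D.length i h0 h1]
  simp [List.getElem?_eq_getElem (pvIdx_lt D.length i h0 h1)]

theorem rowGet_eq (G : List (List Int)) (i : Int) (h0 : -(G.length : Int) ≤ i) (h1 : i < (G.length : Int)) :
    PySem.List.pyGetD G i [] = G[pvIdx G.length i]'(pvIdx_lt G.length i h0 h1) := by
  unfold PySem.List.pyGetD PySem.List.pyGet?
  rw [pyIdx?_eq G.length i h0 h1]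
  simp [List.getElem?_eq_getElem (pvIdx_lt G.length i h0 h1)]

theorem pvSet_eq (D : List Int) (i v : Int) (h0 : -(D.length : Int) ≤ i) (h1 : i < (D.length : Int)) :
    pvSet D i v = D.set (pvIdx D.length i) v := by
  unfold pvSet PySem.List.pySetD PySem.List.pySet?
  rw [pyIdx?_eq D.length i h0 h1]
  rfl

theorem pvSet_length (D : List Int) (i v : Int) : (pvSet D i v).length = D.length := by
  unfold pvSet; exact PySem.List.length_pySetD D i v

theorem pvIdx_set_len (D : List Int) (k : Nat) (w i : Int) :
    pvIdx (D.set k w).length i = pvIdx D.length i := by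
  rw [List.length_set]

theorem pvGet_pvSet_self (D : List Int) (i v : Int) (h0 : -(D.length : Int) ≤ i) (h1 : i < (D.length : Int)) :
    pvGet (pvSet D i v) i = v := by
  rw [pvSet_eq D i v h0 h1, pvGet_eq _ i (by simpa using h0) (by simpa using h1)]
  simp only [pvIdx_set_len]
  exact List.getElem_set_self _

theorem pvGet_pvSet_ne (D : List Int) (i j v : Int) (hi0 : -(D.length : Int) ≤ i) (hi1 : i < (D.length : Int))
    (hj0 : -(D.length : Int) ≤ j) (hj1 : j < (D.length : Int))
    (hne : pvIdx D.length i ≠ pvIdx D.length j) :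
    pvGet (pvSet D i v) j = pvGet D j := by
  rw [pvSet_eq D i v hi0 hi1, pvGet_eq _ j (by simpa using hj0) (by simpa using hj1),
      pvGet_eq D j hj0 hj1]
  simp only [pvIdx_set_len]
  exact List.getElem_set_ne hne _

-- cells with different current values are different cells
theorem idx_ne_of_get_ne (D : List Int) (i j : Int) (hi0 : -(D.length : Int) ≤ i) (hi1 : i < (D.length : Int))
    (hj0 : -(D.length : Int) ≤ j) (hj1 : j < (D.length : Int)) (h : pvGet D i ≠ pvGet D j) :
    pvIdx D.length i ≠ pvIdx D.length j := by
  intro he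
  apply h
  rw [pvGet_eq D i hi0 hi1, pvGet_eq D j hj0 hj1]
  simp only [he]

theorem mem_pvSet (D : List Int) (i v a : Int) (h0 : -(D.length : Int) ≤ i) (h1 : i < (D.length : Int))
    (ha : a ∈ pvSet D i v) : a ∈ D ∨ a = v := by
  rw [pvSet_eq D i v h0 h1] at ha
  exact List.mem_or_eq_of_mem_set ha

theorem count_set_of_eq : ∀ (D : List Int) (k : Nat) (v : Int), (h : k < D.length) →
    D[k]'h = -1 → v ≠ -1 → (D.set k v).count (-1) + 1 = D.count (-1) := by
  intro D
  induction D with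
  | nil => intro k v h; simp at h
  | cons a D ih =>
    intro k v h hk hv
    cases k with
    | zero =>
      simp at hk
      subst hk
      simp [hv]
    | succ k =>
      simp only [List.set_cons_succ, List.count_cons]
      rw [← ih k v (by simpa using h) (by simpa using hk) hv]
      omega

theorem scan_acc (depth : Int) : ∀ (row : List Int) (D a : List Int),
    row.foldl (stepB depth) (D, a) =
      ((row.foldl (stepB depth) (D, [])).1, a ++ (row.foldl (stepB depth) (D, [])).2) := by
  intro row
  induction row with
  | nil => intro D a; simp
  | cons y row ih =>
    intro D a
    simp only [List.foldl_cons]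
    by_cases h : pvGet D y = -1
    · simp only [stepB, h, if_pos]
      rw [ih (pvSet D y (depth + 1)) (a ++ [y]), ih (pvSet D y (depth + 1)) ([] ++ [y])]
      simp
    · simp only [stepB, h, ite_false]
      exact ih D a

theorem level_acc (G : List (List Int)) (depth : Int) : ∀ (F : List Int) (D a : List Int),
    F.foldl (bfsB_scan G depth) (D, a) =
      ((F.foldl (bfsB_scan G depth) (D, [])).1, a ++ (F.foldl (bfsB_scan G depth) (D, [])).2) := by
  intro F
  induction F with
  | nil => intro D a; simp
  | cons u F ih =>
    intro D a
    have hsa : ∀ b, bfsB_scan G depth (D, b) u =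
        ((bfsB_scan G depth (D, []) u).1, b ++ (bfsB_scan G depth (D, []) u).2) := by
      intro b
      rw [bfsB_scan, scan_acc depth _ D b, ← bfsB_scan]
    simp only [List.foldl_cons]
    rw [hsa a, ih (bfsB_scan G depth (D, []) u).1 (a ++ (bfsB_scan G depth (D, []) u).2)]
    conv_rhs => rw [← Prod.mk.eta (p := bfsB_scan G depth (D, []) u)]
    rw [ih (bfsB_scan G depth (D, []) u).1 (bfsB_scan G depth (D, []) u).2]
    simp

theorem rowOK (G : List (List Int)) (hG : GOK G) (u : Int) (hu : NOK G u) :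
    ∀ y ∈ PySem.List.pyGetD G u [], NOK G y := by
  intro y hy
  have hmem : PySem.List.pyGetD G u [] ∈ G := by
    apply PySem.List.pyGetD_mem
    exact ⟨hu.1, hu.2⟩
  exact hG _ hmem y hy

-- all the inner-loop facts in one induction (the level step function)
theorem scanB_facts (G : List (List Int)) (depth : Int) (hd : 0 ≤ depth) :
    ∀ (row : List Int), (∀ y ∈ row, NOK G y) →
    ∀ (D acc : List Int), DOK G D →
    ∃ D' app, row.foldl (stepB depth) (D, acc) = (D', acc ++ app) ∧
      DOK G D' ∧ cneg D' + app.length = cneg D ∧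
      (∀ w : Int, NOK G w → pvGet D w ≠ -1 → pvGet D' w = pvGet D w) ∧
      (∀ y ∈ app, NOK G y ∧ pvGet D' y = depth + 1) := by
  intro row
  induction row with
  | nil =>
    intro _ D acc hD
    exact ⟨D, [], by simp, hD, by simp, fun w _ _ => rfl, by simp⟩
  | cons y row ih =>
    intro hrow D acc hD
    have hy := hrow y (by simp)
    obtain ⟨hy0, hy1⟩ := hy
    have hlen : (D.length : Int) = (G.length : Int) := by exact_mod_cast hD.1
    by_cases h : pvGet D y = -1
    · -- new node y is labelled depth+1 and appended
      simp only [List.foldl_cons, stepB, h, if_pos]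
      have hD1 : DOK G (pvSet D y (depth + 1)) := by
        constructor
        · rw [pvSet_length]; exact hD.1
        · intro a ha
          rcases mem_pvSet D y (depth + 1) a (by omega) (by omega) ha with h' | h'
          · exact hD.2 a h'
          · omega
      obtain ⟨D', app, heq, hD', hcnt, hpres, happ⟩ :=
        ih (fun z hz => hrow z (by simp [hz])) (pvSet D y (depth + 1)) (acc ++ [y]) hD1
      refine ⟨D', y :: app, by rw [heq]; simp, hD', ?_, ?_, ?_⟩
      · -- counting: the set flips one -1 cell
        have hset : cneg (pvSet D y (depth + 1)) + 1 = cneg D := by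
          rw [pvSet_eq D y (depth + 1) (by omega) (by omega)]
          unfold cneg
          apply count_set_of_eq D (pvIdx D.length y) (depth + 1)
            (pvIdx_lt D.length y (by omega) (by omega))
          · rw [← pvGet_eq D y (by omega) (by omega)]; exact h
          · omega
        simp only [List.length_cons]
        omega
      · intro w hw hwne
        obtain ⟨hw0, hw1⟩ := hw
        have hcell : pvIdx D.length y ≠ pvIdx D.length w := by
          apply idx_ne_of_get_ne D y w (by omega) (by omega) (by omega) (by omega)
          rw [h]; exact fun he => hwne he.symm
        have hp : pvGet (pvSet D y (depth + 1)) w = pvGet D w :=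
          pvGet_pvSet_ne D y w (depth + 1) (by omega) (by omega) (by omega) (by omega) hcell
        rw [← hp]
        exact hpres w ⟨hw0, hw1⟩ (by rw [hp]; exact hwne)
      · intro z hz
        rcases List.mem_cons.mp hz with h' | h'
        · subst h'
          refine ⟨⟨hy0, hy1⟩, ?_⟩
          have hself : pvGet (pvSet D z (depth + 1)) z = depth + 1 :=
            pvGet_pvSet_self D z (depth + 1) (by omega) (by omega)
          rw [← hself]
          exact hpres z ⟨hy0, hy1⟩ (by rw [hself]; omega)
        · exact happ z h'
    · simp only [List.foldl_cons, stepB, h, ite_false]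
      exact ih (fun z hz => hrow z (by simp [hz])) D acc hD

-- A's inner loop equals the level inner loop when the dequeued node already carries label 'depth'
theorem scanAB (G : List (List Int)) (depth : Int) (hd : 0 ≤ depth) :
    ∀ (row : List Int), (∀ y ∈ row, NOK G y) →
    ∀ (D acc : List Int) (u : Int), DOK G D → NOK G u → pvGet D u = depth →
    row.foldl (stepA u) (D, acc) = row.foldl (stepB depth) (D, acc) := by
  intro row
  induction row with
  | nil => intro _ D acc u _ _ _; rfl
  | cons y row ih =>
    intro hrow D acc u hD hu hget
    have hy := hrow y (by simp)
    obtain ⟨hy0, hy1⟩ := hy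
    obtain ⟨hu0, hu1⟩ := hu
    have hlen : (D.length : Int) = (G.length : Int) := by exact_mod_cast hD.1
    by_cases h : pvGet D y = -1
    · simp only [List.foldl_cons, stepA, stepB, h, if_pos, hget]
      have hcell : pvIdx D.length y ≠ pvIdx D.length u := by
        apply idx_ne_of_get_ne D y u (by omega) (by omega) (by omega) (by omega)
        rw [h, hget]; omega
      have hD1 : DOK G (pvSet D y (depth + 1)) := by
        constructor
        · rw [pvSet_length]; exact hD.1
        · intro a ha
          rcases mem_pvSet D y (depth + 1) a (by omega) (by omega) ha with h' | h'
          · exact hD.2 a h'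
          · omega
      apply ih (fun z hz => hrow z (by simp [hz])) _ _ u hD1 ⟨hu0, hu1⟩
      rw [pvGet_pvSet_ne D y u (depth + 1) (by omega) (by omega) (by omega) (by omega) hcell]
      exact hget
    · simp only [List.foldl_cons, stepA, stepB, h, ite_false]
      exact ih (fun z hz => hrow z (by simp [hz])) D acc u hD ⟨hu0, hu1⟩ hget

-- level (outer frontier) facts, by folding scanB_facts over the frontier
theorem levelB_facts (G : List (List Int)) (depth : Int) (hG : GOK G) (hd : 0 ≤ depth) :
    ∀ (F : List Int) (D : List Int), DOK G D → (∀ u ∈ F, NOK G u) →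
      DOK G (bfsB_level G depth D F).1 ∧
      cneg (bfsB_level G depth D F).1 + (bfsB_level G depth D F).2.length = cneg D ∧
      (∀ w : Int, NOK G w → pvGet D w ≠ -1 →
        pvGet (bfsB_level G depth D F).1 w = pvGet D w) ∧
      (∀ y ∈ (bfsB_level G depth D F).2,
        NOK G y ∧ pvGet (bfsB_level G depth D F).1 y = depth + 1) := by
  intro F
  induction F with
  | nil =>
    intro D hD _
    exact ⟨hD, by simp [bfsB_level], fun w _ _ => rfl, by simp [bfsB_level]⟩
  | cons u F ih =>
    intro D hD hF
    have hu := hF u (by simp)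
    obtain ⟨D1, app, heq, hD1, hcnt1, hpres1, happ1⟩ :=
      scanB_facts G depth hd _ (rowOK G hG u hu) D [] hD
    have hsc : bfsB_scan G depth (D, []) u = (D1, app) := by
      rw [bfsB_scan]; simpa using heq
    obtain ⟨hD2, hcnt2, hpres2, happ2⟩ := ih D1 hD1 (fun z hz => hF z (by simp [hz]))
    have hlev : bfsB_level G depth D (u :: F) =
        ((bfsB_level G depth D1 F).1, app ++ (bfsB_level G depth D1 F).2) := by
      unfold bfsB_level
      simp only [List.foldl_cons, hsc]
      rw [level_acc G depth F D1 app]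
    rw [hlev]
    refine ⟨hD2, ?_, ?_, ?_⟩
    · simp only [List.length_append]; omega
    · intro w hw hwne
      have h1 := hpres1 w hw hwne
      rw [hpres2 w hw (by rw [h1]; exact hwne), h1]
    · intro y hy
      rcases List.mem_append.mp hy with h' | h'
      · obtain ⟨hyr, hyv⟩ := happ1 y h'
        exact ⟨hyr, by rw [hpres2 y hyr (by rw [hyv]; omega), hyv]⟩
      · exact happ2 y h'

theorem loopA_nil (G : List (List Int)) : ∀ (f : Nat) (D : List Int), bfsA_loop G f D [] = D := by
  intro f D; cases f <;> rfl

theorem loopB_nil (G : List (List Int)) : ∀ (f : Nat) (D : List Int) (depth : Int),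
    bfsB_loop G f D depth [] = D := by
  intro f D depth; cases f <;> rfl

-- the BRIDGE: running A's queue loop through one whole level F (children land after acc)
theorem bridge (G : List (List Int)) (depth : Int) (hG : GOK G) (hd : 0 ≤ depth) :
    ∀ (F D acc : List Int) (f : Nat), DOK G D →
    (∀ u ∈ F, NOK G u ∧ pvGet D u = depth) →
    bfsA_loop G (f + F.length) D (F ++ acc) =
      bfsA_loop G f (bfsB_level G depth D F).1 (acc ++ (bfsB_level G depth D F).2) := by
  intro F
  induction F with
  | nil => intro D acc f _ _; simp [bfsB_level]
  | cons u F ih =>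
    intro D acc f hD hF
    have hu := hF u (by simp)
    obtain ⟨D1, app, heq, hD1, hcnt1, hpres1, happ1⟩ :=
      scanB_facts G depth hd _ (rowOK G hG u hu.1) D [] hD
    have hsc : bfsB_scan G depth (D, []) u = (D1, app) := by
      rw [bfsB_scan]; simpa using heq
    have hscanA : bfsA_scan G (D, F ++ acc) u = (D1, (F ++ acc) ++ app) := by
      rw [bfsA_scan_eq, scanAB G depth hd _ (rowOK G hG u hu.1) D (F ++ acc) u hD hu.1 hu.2,
          scan_acc depth _ D (F ++ acc)]
      have : (PySem.List.pyGetD G u []).foldl (stepB depth) (D, []) = (D1, app) := by simpa using heq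
      rw [this]
    have hfuel : f + (u :: F).length = (f + F.length) + 1 := by simp; omega
    rw [hfuel]
    have hunf : bfsA_loop G ((f + F.length) + 1) D ((u :: F) ++ acc) =
        bfsA_loop G (f + F.length) (bfsA_scan G (D, F ++ acc) u).1 (bfsA_scan G (D, F ++ acc) u).2 := rfl
    rw [hunf, hscanA]
    have hstep : ((F ++ acc) ++ app) = F ++ (acc ++ app) := by simp
    rw [hstep]
    have hF1 : ∀ z ∈ F, NOK G z ∧ pvGet D1 z = depth := by
      intro z hz
      have hz' := hF z (by simp [hz])
      exact ⟨hz'.1, by rw [hpres1 z hz'.1 (by rw [hz'.2]; omega), hz'.2]⟩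
    rw [ih D1 (acc ++ app) f hD1 hF1]
    have hlev : bfsB_level G depth D (u :: F) =
        ((bfsB_level G depth D1 F).1, app ++ (bfsB_level G depth D1 F).2) := by
      unfold bfsB_level
      simp only [List.foldl_cons, hsc]
      rw [level_acc G depth F D1 app]
    rw [hlev]
    simp

-- enough fuel makes the level loop fuel-insensitive
theorem Bfuel (G : List (List Int)) (hG : GOK G) :
    ∀ (f g : Nat) (D : List Int) (depth : Int) (F : List Int),
    DOK G D → (∀ u ∈ F, NOK G u) → 0 ≤ depth →
    cneg D < f → f ≤ g →
    bfsB_loop G f D depth F = bfsB_loop G g D depth F := by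
  intro f
  induction f with
  | zero => intro g D depth F _ _ _ h _; omega
  | succ f ih =>
    intro g D depth F hD hF hd hcf hfg
    cases g with
    | zero => omega
    | succ g =>
      cases F with
      | nil => rfl
      | cons u F' =>
        show bfsB_loop G f (bfsB_level G depth D (u :: F')).1 (depth + 1) (bfsB_level G depth D (u :: F')).2 =
             bfsB_loop G g (bfsB_level G depth D (u :: F')).1 (depth + 1) (bfsB_level G depth D (u :: F')).2
        obtain ⟨hD', hcnt, _, happ⟩ := levelB_facts G depth hG hd (u :: F') D hD hF
        cases hnx : (bfsB_level G depth D (u :: F')).2 with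
        | nil => rw [loopB_nil, loopB_nil]
        | cons z zs =>
          rw [← hnx]
          apply ih g _ (depth + 1) _ hD' (fun y hy => (happ y hy).1) (by omega)
          · rw [hnx] at hcnt; simp at hcnt; omega
          · omega

-- MAIN part 1: with exact fuels, A's queue loop equals the level loop
theorem mainAB (G : List (List Int)) (hG : GOK G) :
    ∀ (k : Nat) (D : List Int) (depth : Int) (F : List Int), cneg D ≤ k →
    DOK G D → 0 ≤ depth → (∀ u ∈ F, NOK G u ∧ pvGet D u = depth) →
    bfsA_loop G (cneg D + F.length + 1) D F = bfsB_loop G (cneg D + 1) D depth F := by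
  intro k
  induction k with
  | zero =>
    intro D depth F hk hD hd hF
    cases F with
    | nil => rw [loopA_nil, loopB_nil]
    | cons u F' =>
      have hF' : ∀ z ∈ (u :: F'), NOK G z := fun z hz => (hF z hz).1
      obtain ⟨hD', hcnt, _, happ⟩ := levelB_facts G depth hG hd (u :: F') D hD hF'
      have hnx : (bfsB_level G depth D (u :: F')).2 = [] := by
        have : (bfsB_level G depth D (u :: F')).2.length = 0 := by omega
        exact List.length_eq_zero_iff.mp this
      have hlhs := bridge G depth hG hd (u :: F') D [] (cneg D + 1) hD hF
      simp only [List.append_nil] at hlhs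
      have hfe : cneg D + 1 + (u :: F').length = cneg D + (u :: F').length + 1 := by omega
      rw [← hfe, hlhs, hnx]
      simp only [List.append_nil]
      rw [loopA_nil]
      show _ = bfsB_loop G (cneg D + 1) D depth (u :: F')
      have hr : bfsB_loop G (cneg D + 1) D depth (u :: F') =
          bfsB_loop G (cneg D) (bfsB_level G depth D (u :: F')).1 (depth + 1) (bfsB_level G depth D (u :: F')).2 := rfl
      rw [hr, hnx, loopB_nil]
  | succ k ih =>
    intro D depth F hk hD hd hF
    cases F with
    | nil => rw [loopA_nil, loopB_nil]
    | cons u F' =>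
      have hF' : ∀ z ∈ (u :: F'), NOK G z := fun z hz => (hF z hz).1
      obtain ⟨hD', hcnt, _, happ⟩ := levelB_facts G depth hG hd (u :: F') D hD hF'
      have hlhs := bridge G depth hG hd (u :: F') D [] (cneg D + 1) hD hF
      simp only [List.append_nil] at hlhs
      have hfe : cneg D + 1 + (u :: F').length = cneg D + (u :: F').length + 1 := by omega
      rw [← hfe, hlhs]
      have hr : bfsB_loop G (cneg D + 1) D depth (u :: F') =
          bfsB_loop G (cneg D) (bfsB_level G depth D (u :: F')).1 (depth + 1) (bfsB_level G depth D (u :: F')).2 := rfl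
      rw [hr]
      simp only [List.nil_append]
      cases hnx : (bfsB_level G depth D (u :: F')).2 with
      | nil =>
        rw [loopA_nil, loopB_nil]
      | cons z zs =>
        rw [← hnx]
        have hlt : cneg (bfsB_level G depth D (u :: F')).1 < cneg D := by
          rw [hnx] at hcnt; simp at hcnt; omega
        have hFn : ∀ y ∈ (bfsB_level G depth D (u :: F')).2,
            NOK G y ∧ pvGet (bfsB_level G depth D (u :: F')).1 y = depth + 1 := happ
        have hcnt' : cneg (bfsB_level G depth D (u :: F')).1 + (bfsB_level G depth D (u :: F')).2.length = cneg D := hcnt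
        have hfe2 : cneg D + 1 =
            cneg (bfsB_level G depth D (u :: F')).1 + (bfsB_level G depth D (u :: F')).2.length + 1 := by omega
        rw [hfe2]
        rw [ih (bfsB_level G depth D (u :: F')).1 (depth + 1) (bfsB_level G depth D (u :: F')).2
              (by omega) hD' (by omega) hFn]
        exact Bfuel G hG (cneg (bfsB_level G depth D (u :: F')).1 + 1) (cneg D)
          (bfsB_level G depth D (u :: F')).1 (depth + 1) (bfsB_level G depth D (u :: F')).2
          hD' (fun y hy => (happ y hy).1) (by omega) (by omega) (by omega)

theorem bfs_eq (G : List (List Int)) (x : Int) (hG : GOK G) (hx : NOK G x) :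
    bfs_distanceA x G = bfs_distanceB x G := by
  have hn : 1 ≤ G.length := by
    obtain ⟨h0, h1⟩ := hx; omega
  set D0 := pvSet (List.replicate G.length (-1)) x 0 with hD0
  have hrl : (List.replicate G.length (-1 : Int)).length = G.length := by simp
  have hD0set : D0 = (List.replicate G.length (-1 : Int)).set (pvIdx G.length x) 0 := by
    rw [hD0, pvSet_eq _ x 0 (by rw [hrl]; exact hx.1) (by rw [hrl]; exact hx.2), hrl]
  have hlen : D0.length = G.length := by rw [hD0, pvSet_length]; simp
  have hklt : pvIdx G.length x < G.length := pvIdx_lt G.length x hx.1 hx.2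
  have hcn : cneg D0 + 1 = G.length := by
    rw [hD0set]
    unfold cneg
    rw [count_set_of_eq (List.replicate G.length (-1)) (pvIdx G.length x) 0
          (by simpa using hklt) (by simp) (by omega)]
    simp
  have hDOK : DOK G D0 := by
    refine ⟨hlen, ?_⟩
    intro a ha
    rw [hD0] at ha
    rcases mem_pvSet _ x 0 a (by rw [hrl]; exact hx.1) (by rw [hrl]; exact hx.2) ha with h' | h'
    · rw [List.eq_of_mem_replicate h']
    · omega
  have hget : pvGet D0 x = 0 := by
    rw [hD0]
    exact pvGet_pvSet_self _ x 0 (by rw [hrl]; exact hx.1) (by rw [hrl]; exact hx.2)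
  have hF : ∀ u ∈ [x], NOK G u ∧ pvGet D0 u = 0 := by
    intro z hz; simp at hz; subst hz; exact ⟨hx, hget⟩
  have hmain := mainAB G hG (cneg D0) D0 0 [x] (le_refl _) hDOK (le_refl _) hF
  unfold bfs_distanceA bfs_distanceB
  rw [← hD0]
  have hfA : G.length + 1 = cneg D0 + [x].length + 1 := by simp; omega
  rw [hfA, hmain]
  exact Bfuel G hG (cneg D0 + 1) (cneg D0 + [x].length + 1) D0 0 [x]
    hDOK (fun z hz => by simp at hz; subst hz; exact hx) (le_refl _) (by omega) (by omega)

-- ======== level loop = round propagation (the C side) ========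

def cellsOf (len : Nat) (ys : List Int) : List Nat := ys.map (pvIdx len)
def relaxFold (k : Int) (D : List Int) (ys : List Int) : List Int := ys.foldl (relax k) D

theorem relax_length (k : Int) (D : List Int) (y : Int) : (relax k D y).length = D.length := by
  unfold relax; split
  · exact pvSet_length D y (k + 1)
  · rfl

theorem relaxFold_length (k : Int) : ∀ (ys : List Int) (D : List Int),
    (relaxFold k D ys).length = D.length := by
  intro ys
  induction ys with
  | nil => intro D; rfl
  | cons y ys ih =>
    intro D
    show (relaxFold k (relax k D y) ys).length = D.length
    rw [ih, relax_length]

theorem pvGet_cell (D : List Int) (c : Nat) (hc : c < D.length) :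
    pvGet D (c : Int) = D[c] := by
  unfold pvGet
  rw [PySem.List.pyGetD_eq_getElem D 0 (by omega) (by exact_mod_cast hc)]
  congr 1

theorem pvGet_idx_cell (D : List Int) (y : Int)
    (hy0 : -(D.length : Int) ≤ y) (hy1 : y < (D.length : Int)) :
    pvGet D ((pvIdx D.length y : Nat) : Int) = pvGet D y := by
  rw [pvGet_cell D (pvIdx D.length y) (pvIdx_lt D.length y hy0 hy1), pvGet_eq D y hy0 hy1]

theorem pvGet_pvSet_cell (D : List Int) (y v : Int) (c : Nat)
    (hy0 : -(D.length : Int) ≤ y) (hy1 : y < (D.length : Int)) (hc : c < D.length) :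
    pvGet (pvSet D y v) (c : Int) = if pvIdx D.length y = c then v else pvGet D (c : Int) := by
  by_cases hcy : pvIdx D.length y = c
  · subst hcy
    rw [if_pos rfl]
    have hlen : (pvSet D y v).length = D.length := pvSet_length D y v
    have h1 : pvGet (pvSet D y v) ((pvIdx D.length y : Nat) : Int) = pvGet (pvSet D y v) y := by
      have h0 : pvIdx (pvSet D y v).length y = pvIdx D.length y := by rw [hlen]
      rw [← h0]
      exact pvGet_idx_cell (pvSet D y v) y (by rw [hlen]; exact hy0) (by rw [hlen]; exact hy1)
    rw [h1]
    exact pvGet_pvSet_self D y v hy0 hy1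
  · rw [if_neg hcy]
    have hcell : pvIdx D.length y ≠ pvIdx D.length ((c : Nat) : Int) := by
      have : pvIdx D.length ((c : Nat) : Int) = c := by unfold pvIdx; simp
      rw [this]
      exact hcy
    exact pvGet_pvSet_ne D y ((c : Nat) : Int) v hy0 hy1 (by omega) (by exact_mod_cast hc) hcell

theorem mem_cellsOf_cons (n : Nat) (y : Int) (ys : List Int) (c : Nat) :
    c ∈ cellsOf n (y :: ys) ↔ pvIdx n y = c ∨ c ∈ cellsOf n ys := by
  show c ∈ pvIdx n y :: cellsOf n ys ↔ _
  rw [List.mem_cons]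
  constructor
  · rintro (h | h)
    · exact Or.inl h.symm
    · exact Or.inr h
  · rintro (h | h)
    · exact Or.inl h.symm
    · exact Or.inr h

-- pointwise characterization of a relaxation pass: a cell becomes k+1 iff it was -1 and is targeted
theorem relaxFold_char (k : Int) (hk : 0 ≤ k) :
    ∀ (ys : List Int) (D : List Int) (c : Nat),
      (∀ y ∈ ys, -(D.length : Int) ≤ y ∧ y < (D.length : Int)) → c < D.length →
      pvGet (relaxFold k D ys) (c : Int) =
        if pvGet D (c : Int) = -1 ∧ c ∈ cellsOf D.length ys then k + 1 else pvGet D (c : Int) := by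
  intro ys
  induction ys with
  | nil =>
    intro D c _ _
    simp [relaxFold, cellsOf]
  | cons y ys ih =>
    intro D c hys hc
    obtain ⟨hy0, hy1⟩ := hys y (by simp)
    have hmemc := mem_cellsOf_cons D.length y ys c
    show pvGet (relaxFold k (relax k D y) ys) (c : Int) = _
    by_cases hg : pvGet D y = -1
    · have hrel : relax k D y = pvSet D y (k + 1) := by unfold relax; rw [if_pos hg]
      have hlen : (pvSet D y (k + 1)).length = D.length := pvSet_length D y (k + 1)
      have hih := ih (pvSet D y (k + 1)) c
        (by rw [hlen]; exact fun z hz => hys z (by simp [hz])) (by rw [hlen]; exact hc)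
      rw [hrel, hih, hlen]
      have hgs := pvGet_pvSet_cell D y (k + 1) c hy0 hy1 hc
      by_cases hcy : pvIdx D.length y = c
      · rw [hgs, if_pos hcy]
        have hDc : pvGet D (c : Int) = -1 := by
          rw [← hcy, pvGet_idx_cell D y hy0 hy1]
          exact hg
        rw [if_neg (by intro h; omega), if_pos ⟨hDc, hmemc.mpr (Or.inl hcy)⟩]
      · rw [hgs, if_neg hcy]
        by_cases hm : c ∈ cellsOf D.length ys
        · by_cases hDc : pvGet D (c : Int) = -1
          · rw [if_pos ⟨hDc, hm⟩, if_pos ⟨hDc, hmemc.mpr (Or.inr hm)⟩]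
          · rw [if_neg (by tauto), if_neg (by tauto)]
        · rw [if_neg (by tauto)]
          rw [if_neg (by intro h; rcases hmemc.mp h.2 with h' | h' <;> tauto)]
    · have hrel : relax k D y = D := by unfold relax; rw [if_neg hg]
      rw [hrel, ih D c (fun z hz => hys z (by simp [hz])) hc]
      by_cases hcy : pvIdx D.length y = c
      · have hDc : pvGet D (c : Int) ≠ -1 := by
          rw [← hcy, pvGet_idx_cell D y hy0 hy1]
          exact hg
        rw [if_neg (by tauto), if_neg (by tauto)]
      · by_cases hDc : pvGet D (c : Int) = -1
        · by_cases hm : c ∈ cellsOf D.length ys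
          · rw [if_pos ⟨hDc, hm⟩, if_pos ⟨hDc, hmemc.mpr (Or.inr hm)⟩]
          · rw [if_neg (by tauto)]
            rw [if_neg (by intro h; rcases hmemc.mp h.2 with h' | h' <;> tauto)]
        · rw [if_neg (by tauto), if_neg (by tauto)]

-- the level step's distance array is one relaxation pass over the row of each frontier node
theorem stepBfold_fst (k : Int) : ∀ (ys : List Int) (D acc : List Int),
    (ys.foldl (stepB k) (D, acc)).1 = relaxFold k D ys := by
  intro ys
  induction ys with
  | nil => intro D acc; rfl
  | cons y ys ih =>
    intro D acc
    by_cases hg : pvGet D y = -1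
    · show ((ys.foldl (stepB k) (stepB k (D, acc) y))).1 = relaxFold k (relax k D y) ys
      simp only [stepB, relax, hg, if_pos]
      exact ih _ _
    · show ((ys.foldl (stepB k) (stepB k (D, acc) y))).1 = relaxFold k (relax k D y) ys
      simp only [stepB, relax, hg, ite_false]
      exact ih _ _

-- which cells the level step appends: exactly the previously -1 targeted cells
theorem stepBfold_snd_cells (k : Int) (hk : 0 ≤ k) :
    ∀ (ys : List Int) (D acc : List Int) (c : Nat),
      (∀ y ∈ ys, -(D.length : Int) ≤ y ∧ y < (D.length : Int)) → c < D.length →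
      ((∃ y ∈ (ys.foldl (stepB k) (D, acc)).2, pvIdx D.length y = c) ↔
        (∃ y ∈ acc, pvIdx D.length y = c) ∨
          (pvGet D (c : Int) = -1 ∧ c ∈ cellsOf D.length ys)) := by
  intro ys
  induction ys with
  | nil =>
    intro D acc c _ _
    simp [cellsOf]
  | cons y ys ih =>
    intro D acc c hys hc
    obtain ⟨hy0, hy1⟩ := hys y (by simp)
    have hmemc := mem_cellsOf_cons D.length y ys c
    by_cases hg : pvGet D y = -1
    · have hstep : stepB k (D, acc) y = (pvSet D y (k + 1), acc ++ [y]) := by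
        simp only [stepB, hg, if_pos]
      have hlen : (pvSet D y (k + 1)).length = D.length := pvSet_length D y (k + 1)
      have hih := ih (pvSet D y (k + 1)) (acc ++ [y]) c
        (by rw [hlen]; exact fun z hz => hys z (by simp [hz])) (by rw [hlen]; exact hc)
      rw [hlen] at hih
      show (∃ y' ∈ (ys.foldl (stepB k) (stepB k (D, acc) y)).2, pvIdx D.length y' = c) ↔ _
      rw [hstep, hih]
      have hgs := pvGet_pvSet_cell D y (k + 1) c hy0 hy1 hc
      by_cases hcy : pvIdx D.length y = c
      · constructor
        · intro _
          have hDc : pvGet D (c : Int) = -1 := by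
            rw [← hcy, pvGet_idx_cell D y hy0 hy1]
            exact hg
          exact Or.inr ⟨hDc, hmemc.mpr (Or.inl hcy)⟩
        · intro _
          exact Or.inl ⟨y, by simp, hcy⟩
      · rw [hgs, if_neg hcy]
        constructor
        · rintro (⟨z, hz, hzc⟩ | ⟨h1, h2⟩)
          · rcases List.mem_append.mp hz with h' | h'
            · exact Or.inl ⟨z, h', hzc⟩
            · simp at h'; subst h'; exact absurd hzc hcy
          · exact Or.inr ⟨h1, hmemc.mpr (Or.inr h2)⟩
        · rintro (⟨z, hz, hzc⟩ | ⟨h1, h2⟩)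
          · exact Or.inl ⟨z, List.mem_append.mpr (Or.inl hz), hzc⟩
          · rcases hmemc.mp h2 with h' | h'
            · exact absurd h' hcy
            · exact Or.inr ⟨h1, h'⟩
    · have hstep : stepB k (D, acc) y = (D, acc) := by
        simp only [stepB, hg, ite_false]
      show (∃ y' ∈ (ys.foldl (stepB k) (stepB k (D, acc) y)).2, pvIdx D.length y' = c) ↔ _
      rw [hstep, ih D acc c (fun z hz => hys z (by simp [hz])) hc]
      by_cases hcy : pvIdx D.length y = c
      · have hDc : pvGet D (c : Int) ≠ -1 := by
          rw [← hcy, pvGet_idx_cell D y hy0 hy1]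
          exact hg
        constructor
        · rintro (h | ⟨h1, h2⟩)
          · exact Or.inl h
          · exact Or.inr ⟨h1, hmemc.mpr (Or.inr h2)⟩
        · rintro (h | ⟨h1, h2⟩)
          · exact Or.inl h
          · rcases hmemc.mp h2 with h' | h'
            · exact absurd h1 hDc
            · exact Or.inr ⟨h1, h'⟩
      · constructor
        · rintro (h | ⟨h1, h2⟩)
          · exact Or.inl h
          · exact Or.inr ⟨h1, hmemc.mpr (Or.inr h2)⟩
        · rintro (h | ⟨h1, h2⟩)
          · exact Or.inl h
          · rcases hmemc.mp h2 with h' | h'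
            · exact absurd h' hcy
            · exact Or.inr ⟨h1, h'⟩

theorem flatRows_NOK (G : List (List Int)) (hG : GOK G) (F : List Int) (hF : ∀ u ∈ F, NOK G u) :
    ∀ y ∈ F.flatMap (fun u => PySem.List.pyGetD G u []), NOK G y := by
  intro y hy
  rcases List.mem_flatMap.mp hy with ⟨u, hu, hyu⟩
  exact rowOK G hG u (hF u hu) y hyu

theorem levelB_fst (G : List (List Int)) (k : Int) : ∀ (F : List Int) (D acc : List Int),
    (F.foldl (bfsB_scan G k) (D, acc)).1 =
      relaxFold k D (F.flatMap (fun u => PySem.List.pyGetD G u [])) := by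
  intro F
  induction F with
  | nil => intro D acc; rfl
  | cons u F ih =>
    intro D acc
    simp only [List.foldl_cons]
    have hs : bfsB_scan G k (D, acc) u =
        ((bfsB_scan G k (D, acc) u).1, (bfsB_scan G k (D, acc) u).2) := by simp
    rw [hs, ih]
    have h1 : (bfsB_scan G k (D, acc) u).1 = relaxFold k D (PySem.List.pyGetD G u []) := by
      rw [bfsB_scan]; exact stepBfold_fst k _ D acc
    rw [h1]
    show relaxFold k (relaxFold k D (PySem.List.pyGetD G u []))
        (F.flatMap (fun u => PySem.List.pyGetD G u [])) = _
    rw [List.flatMap_cons]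
    unfold relaxFold
    rw [List.foldl_append]

theorem levelB_snd_cells (G : List (List Int)) (k : Int) (hk : 0 ≤ k) (hG : GOK G) :
    ∀ (F : List Int) (D acc : List Int) (c : Nat),
      (∀ u ∈ F, NOK G u) → D.length = G.length → c < G.length →
      ((∃ y ∈ (F.foldl (bfsB_scan G k) (D, acc)).2, pvIdx G.length y = c) ↔
        (∃ y ∈ acc, pvIdx G.length y = c) ∨
          (pvGet D (c : Int) = -1 ∧
            c ∈ cellsOf G.length (F.flatMap (fun u => PySem.List.pyGetD G u [])))) := by
  intro F
  induction F with
  | nil =>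
    intro D acc c _ _ _
    simp [cellsOf]
  | cons u F ih =>
    intro D acc c hF hD hc
    have hu := hF u (by simp)
    have hrow := rowOK G hG u hu
    have hrowD : ∀ y ∈ PySem.List.pyGetD G u [], -(D.length : Int) ≤ y ∧ y < (D.length : Int) := by
      intro y hy
      obtain ⟨h0, h1⟩ := hrow y hy
      constructor <;> (rw [hD]; assumption) 
    simp only [List.foldl_cons]
    have hs : bfsB_scan G k (D, acc) u =
        ((bfsB_scan G k (D, acc) u).1, (bfsB_scan G k (D, acc) u).2) := by simp
    have hfst : (bfsB_scan G k (D, acc) u).1 = relaxFold k D (PySem.List.pyGetD G u []) := by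
      rw [bfsB_scan]; exact stepBfold_fst k _ D acc
    have hlenf : (bfsB_scan G k (D, acc) u).1.length = G.length := by
      rw [hfst, relaxFold_length, hD]
    rw [hs, ih (bfsB_scan G k (D, acc) u).1 (bfsB_scan G k (D, acc) u).2 c
          (fun z hz => hF z (by simp [hz])) hlenf hc]
    have hsnd : (∃ y ∈ (bfsB_scan G k (D, acc) u).2, pvIdx G.length y = c) ↔
        (∃ y ∈ acc, pvIdx G.length y = c) ∨
          (pvGet D (c : Int) = -1 ∧ c ∈ cellsOf G.length (PySem.List.pyGetD G u [])) := by
      have := stepBfold_snd_cells k hk (PySem.List.pyGetD G u []) D acc c hrowD (by rw [hD]; exact hc)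
      rw [hD] at this
      rw [bfsB_scan]
      exact this
    have hchar := relaxFold_char k hk (PySem.List.pyGetD G u []) D c hrowD (by rw [hD]; exact hc)
    rw [hD] at hchar
    rw [hfst, hchar]
    have hmemapp : c ∈ cellsOf G.length ((u :: F).flatMap (fun u => PySem.List.pyGetD G u [])) ↔
        c ∈ cellsOf G.length (PySem.List.pyGetD G u []) ∨
          c ∈ cellsOf G.length (F.flatMap (fun u => PySem.List.pyGetD G u [])) := by
      rw [List.flatMap_cons]
      unfold cellsOf
      rw [List.map_append]
      exact List.mem_append
    by_cases hm1 : c ∈ cellsOf G.length (PySem.List.pyGetD G u [])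
    · by_cases hDc : pvGet D (c : Int) = -1
      · rw [if_pos ⟨hDc, hm1⟩, hsnd]
        constructor
        · rintro ((h | ⟨h1, h2⟩) | ⟨h1, _⟩)
          · exact Or.inl h
          · exact Or.inr ⟨h1, hmemapp.mpr (Or.inl h2)⟩
          · omega
        · rintro (h | ⟨h1, _⟩)
          · exact Or.inl (Or.inl h)
          · exact Or.inl (Or.inr ⟨h1, hm1⟩)
      · rw [if_neg (by tauto), hsnd]
        constructor
        · rintro ((h | ⟨h1, _⟩) | ⟨h1, h2⟩)
          · exact Or.inl h
          · exact absurd h1 hDc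
          · exact Or.inr ⟨h1, hmemapp.mpr (Or.inr h2)⟩
        · rintro (h | ⟨h1, h2⟩)
          · exact Or.inl (Or.inl h)
          · rcases hmemapp.mp h2 with h' | h'
            · exact absurd h1 hDc
            · exact Or.inr ⟨h1, h'⟩
    · rw [if_neg (by tauto), hsnd]
      constructor
      · rintro ((h | ⟨h1, h2⟩) | ⟨h1, h2⟩)
        · exact Or.inl h
        · exact absurd h2 hm1
        · exact Or.inr ⟨h1, hmemapp.mpr (Or.inr h2)⟩
      · rintro (h | ⟨h1, h2⟩)
        · exact Or.inl (Or.inl h)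
        · rcases hmemapp.mp h2 with h' | h'
          · exact absurd h' hm1
          · exact Or.inr ⟨h1, h'⟩

-- the evolving guard 'D[a] == k' can be read off the round's INITIAL array
theorem roundC_fold (G : List (List Int)) (k : Int) (hk : 0 ≤ k) (hG : GOK G) :
    ∀ (L : List Int), (∀ a ∈ L, 0 ≤ a ∧ a < (G.length : Int)) →
    ∀ (T : List Int), (∀ y ∈ T, NOK G y) →
    ∀ (D0 : List Int), D0.length = G.length →
    L.foldl (stepC G k) (relaxFold k D0 T) =
      relaxFold k D0 (T ++ L.flatMap (fun a => if pvGet D0 a = k then PySem.List.pyGetD G a [] else [])) := by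
  intro L
  induction L with
  | nil => intro _ T _ D0 _; simp
  | cons a L ih =>
    intro hL T hT D0 hD0
    obtain ⟨ha0, ha1⟩ := hL a (by simp)
    have hTD : ∀ y ∈ T, -(D0.length : Int) ≤ y ∧ y < (D0.length : Int) := by
      intro y hy; obtain ⟨h0, h1⟩ := hT y hy
      constructor <;> (rw [hD0]; assumption)
    have hc : a.toNat < D0.length := by rw [hD0]; omega
    have hca : ((a.toNat : Nat) : Int) = a := by omega
    have hchar := relaxFold_char k hk T D0 a.toNat hTD hc
    have hguard : pvGet (relaxFold k D0 T) a = k ↔ pvGet D0 a = k := by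
      rw [← hca, hchar]
      by_cases hcond : pvGet D0 ((a.toNat : Nat) : Int) = -1 ∧ a.toNat ∈ cellsOf D0.length T
      · rw [if_pos hcond]
        constructor
        · intro h; omega
        · intro h; rw [h] at hcond; omega
      · rw [if_neg hcond]
    simp only [List.foldl_cons]
    by_cases hg : pvGet D0 a = k
    · have hg' : pvGet (relaxFold k D0 T) a = k := hguard.mpr hg
      have hstep : stepC G k (relaxFold k D0 T) a =
          relaxFold k D0 (T ++ PySem.List.pyGetD G a []) := by
        unfold stepC
        rw [if_pos hg']
        unfold relaxFold
        rw [List.foldl_append]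
      rw [hstep]
      have hT' : ∀ y ∈ T ++ PySem.List.pyGetD G a [], NOK G y := by
        intro y hy
        rcases List.mem_append.mp hy with h' | h'
        · exact hT y h'
        · exact rowOK G hG a ⟨by omega, ha1⟩ y h'
      rw [ih (fun z hz => hL z (by simp [hz])) (T ++ PySem.List.pyGetD G a []) hT' D0 hD0]
      rw [List.flatMap_cons, if_pos hg]
      simp
    · have hg' : ¬ pvGet (relaxFold k D0 T) a = k := fun h => hg (hguard.mp h)
      have hstep : stepC G k (relaxFold k D0 T) a = relaxFold k D0 T := by
        unfold stepC; rw [if_neg hg']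
      rw [hstep, ih (fun z hz => hL z (by simp [hz])) T hT D0 hD0]
      rw [List.flatMap_cons, if_neg hg]
      simp

theorem flatGuard_NOK (G : List (List Int)) (hG : GOK G) (D0 : List Int) (k : Int) :
    ∀ y ∈ (PySem.List.pyRange 0 (G.length : Int) 1).flatMap
        (fun a => if pvGet D0 a = k then PySem.List.pyGetD G a [] else []), NOK G y := by
  intro y hy
  rcases List.mem_flatMap.mp hy with ⟨a, ha, hya⟩
  have hb := (PySem.List.mem_pyRange_one).mp ha
  by_cases hg : pvGet D0 a = k
  · rw [if_pos hg] at hya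
    exact rowOK G hG a ⟨by omega, by omega⟩ y hya
  · rw [if_neg hg] at hya
    simp at hya

-- the round and the level step target exactly the same cells, hence produce the same array
theorem roundC_eq_level (G : List (List Int)) (k : Int) (hk : 0 ≤ k) (hG : GOK G)
    (D F : List Int) (hD : D.length = G.length) (hF : ∀ u ∈ F, NOK G u)
    (hk4 : ∀ c : Nat, c < G.length → (pvGet D (c : Int) = k ↔ ∃ u ∈ F, pvIdx G.length u = c)) :
    bfsC_round G D k = (bfsB_level G k D F).1 := by
  have hC : bfsC_round G D k =
      relaxFold k D ((PySem.List.pyRange 0 (G.length : Int) 1).flatMap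
        (fun a => if pvGet D a = k then PySem.List.pyGetD G a [] else [])) := by
    have h0 : D = relaxFold k D [] := rfl
    unfold bfsC_round
    conv_lhs => rw [h0]
    rw [roundC_fold G k hk hG _ (fun a ha => (PySem.List.mem_pyRange_one).mp ha) [] (by simp) D hD]
    simp
  have hL : (bfsB_level G k D F).1 =
      relaxFold k D (F.flatMap (fun u => PySem.List.pyGetD G u [])) := by
    unfold bfsB_level
    exact levelB_fst G k F D []
  rw [hC, hL]
  -- both arrays agree pointwise by the characterization; the target cell sets coincide
  have hTC := flatGuard_NOK G hG D k
  have hTF := flatRows_NOK G hG F hF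
  have hTCD : ∀ y ∈ (PySem.List.pyRange 0 (G.length : Int) 1).flatMap
      (fun a => if pvGet D a = k then PySem.List.pyGetD G a [] else []),
      -(D.length : Int) ≤ y ∧ y < (D.length : Int) := by
    intro y hy; obtain ⟨h0, h1⟩ := hTC y hy; constructor <;> (rw [hD]; assumption)
  have hTFD : ∀ y ∈ F.flatMap (fun u => PySem.List.pyGetD G u []),
      -(D.length : Int) ≤ y ∧ y < (D.length : Int) := by
    intro y hy; obtain ⟨h0, h1⟩ := hTF y hy; constructor <;> (rw [hD]; assumption)
  -- membership in the two target cell sets is the same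
  have hmem : ∀ c : Nat, c < G.length →
      (c ∈ cellsOf G.length ((PySem.List.pyRange 0 (G.length : Int) 1).flatMap
          (fun a => if pvGet D a = k then PySem.List.pyGetD G a [] else [])) ↔
        c ∈ cellsOf G.length (F.flatMap (fun u => PySem.List.pyGetD G u []))) := by
    intro c hcn
    constructor
    · intro h
      rcases List.mem_map.mp h with ⟨y, hy, hyc⟩
      rcases List.mem_flatMap.mp hy with ⟨a, ha, hya⟩
      have hb := (PySem.List.mem_pyRange_one).mp ha
      by_cases hg : pvGet D a = k
      · rw [if_pos hg] at hya
        have hag : a.toNat < G.length := by omega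
        have hca : ((a.toNat : Nat) : Int) = a := by omega
        obtain ⟨u, hu, huc⟩ := (hk4 a.toNat hag).mp (by rw [hca]; exact hg)
        apply List.mem_map.mpr
        refine ⟨y, List.mem_flatMap.mpr ⟨u, hu, ?_⟩, hyc⟩
        obtain ⟨hu0, hu1⟩ := hF u hu
        have h1 : PySem.List.pyGetD G u [] = G[pvIdx G.length u]'(pvIdx_lt G.length u hu0 hu1) :=
          rowGet_eq G u hu0 hu1
        have h2 : PySem.List.pyGetD G a [] = G[pvIdx G.length a]'(pvIdx_lt G.length a (by omega) (by omega)) :=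
          rowGet_eq G a (by omega) (by omega)
        have hia : pvIdx G.length a = a.toNat := by unfold pvIdx; rw [if_pos hb.1]
        have h3 : G[pvIdx G.length u]'(pvIdx_lt G.length u hu0 hu1) =
            G[pvIdx G.length a]'(pvIdx_lt G.length a (by omega) (by omega)) := by
          congr 1
          rw [huc, hia]
        rw [h1, h3, ← h2]
        exact hya
      · rw [if_neg hg] at hya; simp at hya
    · intro h
      rcases List.mem_map.mp h with ⟨y, hy, hyc⟩
      rcases List.mem_flatMap.mp hy with ⟨u, hu, hyu⟩
      obtain ⟨hu0, hu1⟩ := hF u hu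
      have hcu : pvIdx G.length u < G.length := pvIdx_lt G.length u hu0 hu1
      have hguard : pvGet D ((pvIdx G.length u : Nat) : Int) = k :=
        (hk4 (pvIdx G.length u) hcu).mpr ⟨u, hu, rfl⟩
      apply List.mem_map.mpr
      refine ⟨y, List.mem_flatMap.mpr ⟨((pvIdx G.length u : Nat) : Int), ?_, ?_⟩, hyc⟩
      · apply (PySem.List.mem_pyRange_one).mpr
        constructor <;> omega
      · rw [if_pos hguard]
        have hrowa : PySem.List.pyGetD G ((pvIdx G.length u : Nat) : Int) [] =
            G[pvIdx G.length ((pvIdx G.length u : Nat) : Int)]'(pvIdx_lt G.length _ (by omega) (by omega)) :=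
          rowGet_eq G _ (by omega) (by omega)
        have hii : pvIdx G.length ((pvIdx G.length u : Nat) : Int) = pvIdx G.length u := by
          unfold pvIdx
          rw [if_pos (by omega)]
          omega
        rw [hrowa]
        have : G[pvIdx G.length ((pvIdx G.length u : Nat) : Int)]'(pvIdx_lt G.length _ (by omega) (by omega)) =
            G[pvIdx G.length u]'hcu := by
          congr 1
        rw [this, ← rowGet_eq G u hu0 hu1]
        exact hyu
  -- arrays equal pointwise
  apply List.ext_getElem
  · rw [relaxFold_length, relaxFold_length]
  · intro i h1 h2
    have hiD : i < D.length := by rw [relaxFold_length] at h1; exact h1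
    have hiG : i < G.length := by rw [hD] at hiD; exact hiD
    have hA := relaxFold_char k hk _ D i hTCD hiD
    have hB := relaxFold_char k hk _ D i hTFD hiD
    rw [pvGet_cell _ i h1] at hA
    rw [pvGet_cell _ i h2] at hB
    rw [hA, hB, hD]
    by_cases hDc : pvGet D (i : Int) = -1
    · by_cases hm : i ∈ cellsOf G.length (F.flatMap (fun u => PySem.List.pyGetD G u []))
      · rw [if_pos ⟨hDc, (hmem i hiG).mpr hm⟩, if_pos ⟨hDc, hm⟩]
      · rw [if_neg (by intro hh; exact hm ((hmem i hiG).mp hh.2)), if_neg (by tauto)]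
    · rw [if_neg (by tauto), if_neg (by tauto)]

-- entries of an array, cellwise
theorem mem_iff_cell (D : List Int) (a : Int) : a ∈ D ↔ ∃ c : Nat, ∃ h : c < D.length, D[c]'h = a := by
  constructor
  · intro h
    rcases List.mem_iff_getElem.mp h with ⟨c, hc, he⟩
    exact ⟨c, hc, he⟩
  · rintro ⟨c, hc, he⟩
    exact he ▸ List.getElem_mem hc

-- MAIN part 2: the round loop over range(k, n) equals the level loop started at depth k
theorem loopCB (G : List (List Int)) (hG : GOK G) :
    ∀ (j : Nat) (k : Int) (D F : List Int) (f : Nat),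
      0 ≤ k → k.toNat + j = G.length → DOK G D → (∀ u ∈ F, NOK G u) →
      (∀ a ∈ D, a ≤ k) →
      (∀ c : Nat, c < G.length → (pvGet D (c : Int) = k ↔ ∃ u ∈ F, pvIdx G.length u = c)) →
      (F ≠ [] → k + 1 + (cneg D : Int) ≤ (G.length : Int)) →
      cneg D < f →
      (PySem.List.pyRange k (G.length : Int) 1).foldl (bfsC_round G) D = bfsB_loop G f D k F := by
  intro j
  induction j with
  | zero =>
    intro k D F f hk hkj hD hF hle hk4 h5 hf
    have hkn : k = (G.length : Int) := by omega
    rw [hkn, PySem.List.pyRange_one_eq_nil (le_refl _)]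
    cases F with
    | nil => rw [loopB_nil]; rfl
    | cons u F' =>
      exfalso
      have := h5 (by simp)
      omega
  | succ j ih =>
    intro k D F f hk hkj hD hF hle hk4 h5 hf
    have hkn : k < (G.length : Int) := by omega
    rw [PySem.List.pyRange_one_cons hkn]
    simp only [List.foldl_cons]
    cases F with
    | nil =>
      -- no node labelled k: the round is a no-op and the level loop has already stopped
      have hround : bfsC_round G D k = D := by
        rw [roundC_eq_level G k hk hG D [] hD.1 (by simp) (by
          intro c hc
          rw [hk4 c hc])]
        rfl
      rw [hround, loopB_nil]
      have hres := ih (k + 1) D [] (cneg D + 1) (by omega) (by omega) hD (by simp)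
        (by intro a ha; have := hle a ha; omega)
        (by
          intro c hc
          constructor
          · intro hcv
            exfalso
            have hmem : pvGet D (c : Int) ∈ D := by
              rw [pvGet_cell D c (by rw [hD.1]; exact hc)]
              exact List.getElem_mem _
            have := hle _ hmem
            omega
          · rintro ⟨u, hu, -⟩; simp at hu)
        (by intro h; simp at h) (by omega)
      rw [hres, loopB_nil]
    | cons u F' =>
      have hFne : (u :: F') ≠ [] := by simp
      have h5' := h5 hFne
      cases f with
      | zero => omega
      | succ f' =>
        have hround : bfsC_round G D k = (bfsB_level G k D (u :: F')).1 :=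
          roundC_eq_level G k hk hG D (u :: F') hD.1 hF hk4
        have hloop : bfsB_loop G (f' + 1) D k (u :: F') =
            bfsB_loop G f' (bfsB_level G k D (u :: F')).1 (k + 1) (bfsB_level G k D (u :: F')).2 := rfl
        rw [hround, hloop]
        obtain ⟨hD', hcnt, hpres, happ⟩ := levelB_facts G k hG hk (u :: F') D hD hF
        -- characterisation of the new array via the relaxation pass
        have hfst : (bfsB_level G k D (u :: F')).1 =
            relaxFold k D ((u :: F').flatMap (fun w => PySem.List.pyGetD G w [])) := by
          unfold bfsB_level; exact levelB_fst G k (u :: F') D []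
        have hTFD : ∀ y ∈ (u :: F').flatMap (fun w => PySem.List.pyGetD G w []),
            -(D.length : Int) ≤ y ∧ y < (D.length : Int) := by
          intro y hy
          obtain ⟨h0, h1⟩ := flatRows_NOK G hG (u :: F') hF y hy
          constructor <;> (rw [hD.1]; assumption)
        have hchar : ∀ c : Nat, c < G.length →
            pvGet (bfsB_level G k D (u :: F')).1 (c : Int) =
              if pvGet D (c : Int) = -1 ∧
                  c ∈ cellsOf G.length ((u :: F').flatMap (fun w => PySem.List.pyGetD G w []))
                then k + 1 else pvGet D (c : Int) := by
          intro c hc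
          rw [hfst]
          have := relaxFold_char k hk _ D c hTFD (by rw [hD.1]; exact hc)
          rw [hD.1] at this
          exact this
        -- new entries bound
        have hle' : ∀ a ∈ (bfsB_level G k D (u :: F')).1, a ≤ k + 1 := by
          intro a ha
          rcases (mem_iff_cell _ a).mp ha with ⟨c, hcl, hcv⟩
          have hcG : c < G.length := by rw [← hD'.1]; exact hcl
          have := hchar c hcG
          rw [pvGet_cell _ c hcl] at this
          rw [← hcv, this]
          split_ifs
          · omega
          · have hmem : pvGet D (c : Int) ∈ D := by
              rw [pvGet_cell D c (by rw [hD.1]; exact hcG)]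
              exact List.getElem_mem _
            have := hle _ hmem
            omega
        -- new frontier charaterisation
        have hsnd : ∀ c : Nat, c < G.length →
            ((∃ y ∈ (bfsB_level G k D (u :: F')).2, pvIdx G.length y = c) ↔
              (pvGet D (c : Int) = -1 ∧
                c ∈ cellsOf G.length ((u :: F').flatMap (fun w => PySem.List.pyGetD G w [])))) := by
          intro c hc
          unfold bfsB_level
          rw [levelB_snd_cells G k hk hG (u :: F') D [] c hF hD.1 hc]
          simp
        have hk4' : ∀ c : Nat, c < G.length →
            (pvGet (bfsB_level G k D (u :: F')).1 (c : Int) = k + 1 ↔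
              ∃ y ∈ (bfsB_level G k D (u :: F')).2, pvIdx G.length y = c) := by
          intro c hc
          rw [hchar c hc, hsnd c hc]
          by_cases hcond : pvGet D (c : Int) = -1 ∧
              c ∈ cellsOf G.length ((u :: F').flatMap (fun w => PySem.List.pyGetD G w []))
          · rw [if_pos hcond]
            tauto
          · rw [if_neg hcond]
            constructor
            · intro h
              exfalso
              have hmem : pvGet D (c : Int) ∈ D := by
                rw [pvGet_cell D c (by rw [hD.1]; exact hc)]
                exact List.getElem_mem _
              have := hle _ hmem
              omega
            · tauto
        cases hnx : (bfsB_level G k D (u :: F')).2 with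
        | nil =>
          -- next frontier empty: level loop returns; remaining rounds are no-ops
          rw [loopB_nil]
          have hres := ih (k + 1) (bfsB_level G k D (u :: F')).1 []
            (cneg (bfsB_level G k D (u :: F')).1 + 1) (by omega) (by omega) hD' (by simp)
            hle'
            (by
              intro c hc
              rw [hk4' c hc, hnx])
            (by intro h; simp at h) (by omega)
          rw [hres, loopB_nil]
        | cons z zs =>
          rw [← hnx]
          apply ih (k + 1) (bfsB_level G k D (u :: F')).1 (bfsB_level G k D (u :: F')).2 f'
            (by omega) (by omega) hD' (fun y hy => (happ y hy).1) hle' hk4'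
          · intro _
            have hlen1 : (bfsB_level G k D (u :: F')).2.length ≥ 1 := by rw [hnx]; simp
            omega
          · have hlen1 : (bfsB_level G k D (u :: F')).2.length ≥ 1 := by rw [hnx]; simp
            omega

-- C's distance array equals the level loop's, hence A's
theorem distC_eq_distB (G : List (List Int)) (x : Int) (hG : GOK G) (hx : NOK G x) :
    bfs_distanceC x G = bfs_distanceB x G := by
  have hn : 1 ≤ G.length := by obtain ⟨h0, h1⟩ := hx; omega
  set D0 := pvSet (List.replicate G.length (-1)) x 0 with hD0
  have hrl : (List.replicate G.length (-1 : Int)).length = G.length := by simp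
  have hD0set : D0 = (List.replicate G.length (-1 : Int)).set (pvIdx G.length x) 0 := by
    rw [hD0, pvSet_eq _ x 0 (by rw [hrl]; exact hx.1) (by rw [hrl]; exact hx.2), hrl]
  have hlen : D0.length = G.length := by rw [hD0, pvSet_length]; simp
  have hklt : pvIdx G.length x < G.length := pvIdx_lt G.length x hx.1 hx.2
  have hcn : cneg D0 + 1 = G.length := by
    rw [hD0set]
    unfold cneg
    rw [count_set_of_eq (List.replicate G.length (-1)) (pvIdx G.length x) 0
          (by simpa using hklt) (by simp) (by omega)]
    simp
  have hDOK : DOK G D0 := by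
    refine ⟨hlen, ?_⟩
    intro a ha
    rw [hD0] at ha
    rcases mem_pvSet _ x 0 a (by rw [hrl]; exact hx.1) (by rw [hrl]; exact hx.2) ha with h' | h'
    · rw [List.eq_of_mem_replicate h']
    · omega
  have hle0 : ∀ a ∈ D0, a ≤ 0 := by
    intro a ha
    rw [hD0] at ha
    rcases mem_pvSet _ x 0 a (by rw [hrl]; exact hx.1) (by rw [hrl]; exact hx.2) ha with h' | h'
    · rw [List.eq_of_mem_replicate h']; omega
    · omega
  have hk4 : ∀ c : Nat, c < G.length → (pvGet D0 (c : Int) = 0 ↔ ∃ u ∈ [x], pvIdx G.length u = c) := by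
    intro c hc
    have hget := pvGet_pvSet_cell (List.replicate G.length (-1)) x 0 c
      (by rw [hrl]; exact hx.1) (by rw [hrl]; exact hx.2) (by rw [hrl]; exact hc)
    rw [hrl] at hget
    rw [hD0, hget]
    by_cases hcx : pvIdx G.length x = c
    · rw [if_pos hcx]
      simp [hcx]
    · rw [if_neg hcx]
      have : pvGet (List.replicate G.length (-1 : Int)) (c : Int) = -1 := by
        rw [pvGet_cell _ c (by rw [hrl]; exact hc)]
        simp
      rw [this]
      simp [hcx]
  have hmain := loopCB G hG G.length 0 D0 [x] (cneg D0 + 1) (le_refl _) (by simp)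
    hDOK (by intro z hz; simp at hz; subst hz; exact hx) hle0 hk4
    (by intro _; omega) (by omega)
  unfold bfs_distanceC bfs_distanceB
  rw [← hD0]
  have h0 : (PySem.List.pyRange 0 (G.length : Int) 1) = (PySem.List.pyRange (0 : Int) (G.length : Int) 1) := rfl
  rw [hmain]
  exact Bfuel G hG (cneg D0 + 1) (G.length + 1) D0 0 [x]
    hDOK (fun z hz => by simp at hz; subst hz; exact hx) (le_refl _) (by omega) (by omega)

theorem distA_eq_distC (G : List (List Int)) (x : Int) (hG : GOK G) (hx : NOK G x) :
    bfs_distanceA x G = bfs_distanceC x G :=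
  (bfs_eq G x hG hx).trans (distC_eq_distB G x hG hx).symm

-- ===== VERDICT (by name: the statement is the Claim_ definition above) =====
theorem bfs_same_distance_spec : Claim_equal_bfs_same_distance := by
  intro u v G _ hpre
  obtain ⟨hu0, hu1, hv0, hv1, hG⟩ := hpre
  unfold Spec_bfs_same_distance bfs_same_distance bfs_same_distance_alt
  rw [distA_eq_distC G u hG ⟨hu0, hu1⟩, distA_eq_distC G v hG ⟨hv0, hv1⟩]
  rw [PySem.List.foldl_append_ite_eq_filter]
  simp
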